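-- pv_equiv track=rewrite | github.com/HoanChan/ETV | src/datasets/transforms/transforms_utils.py | get_bbox_nums
-- ===== SOURCE A (Python) =====
-- def get_bbox_nums(tokens: list) -> int:
--     pattern = ['<td></td>', '<td', '<eb></eb>',
--                '<eb1></eb1>', '<eb2></eb2>', '<eb3></eb3>',
--                '<eb4></eb4>', '<eb5></eb5>', '<eb6></eb6>',
--                '<eb7></eb7>', '<eb8></eb8>', '<eb9></eb9>',
--                '<eb10></eb10>']
--     count = 0
--     for t in tokens:
--         if t in pattern:
--             count += 1
--     return count
-- ===== SOURCE B (Python) =====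
-- def get_bbox_nums(tokens: list) -> int:
--     pattern = ['<td></td>', '<td', '<eb></eb>',
--                '<eb1></eb1>', '<eb2></eb2>', '<eb3></eb3>',
--                '<eb4></eb4>', '<eb5></eb5>', '<eb6></eb6>',
--                '<eb7></eb7>', '<eb8></eb8>', '<eb9></eb9>',
--                '<eb10></eb10>']
--     counts = {}
--     for t in tokens:
--         counts[t] = counts.get(t, 0) + 1
--     return sum(counts.get(p, 0) for p in pattern)
-- ===== Notes on version B (the rewrite author's own statement) =====
-- stated objective: alternative
-- what changed: B tabulates token frequencies in one dict pass and then sums the counts of the 13 fixed patterns, instead of scanning tokens and linearly membership-testing each against the pattern list; correct because the patterns are pairwise distinct.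
import Mathlib
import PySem

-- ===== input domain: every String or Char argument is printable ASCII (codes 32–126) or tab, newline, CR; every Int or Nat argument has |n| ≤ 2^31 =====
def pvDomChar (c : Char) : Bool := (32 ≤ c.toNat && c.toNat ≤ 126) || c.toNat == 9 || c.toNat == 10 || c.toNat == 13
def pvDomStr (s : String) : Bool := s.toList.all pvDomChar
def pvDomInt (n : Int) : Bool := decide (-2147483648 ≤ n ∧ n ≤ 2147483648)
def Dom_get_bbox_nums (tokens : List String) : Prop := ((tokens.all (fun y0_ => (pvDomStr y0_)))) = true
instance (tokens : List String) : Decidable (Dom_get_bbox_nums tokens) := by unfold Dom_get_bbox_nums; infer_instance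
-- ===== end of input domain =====

-- B tabulates token frequencies in one dict pass and then sums the counts of the 13 fixed
-- patterns; A scans tokens and membership-tests each against the pattern list.

def pvPattern : List String :=
  ["<td></td>", "<td", "<eb></eb>",
   "<eb1></eb1>", "<eb2></eb2>", "<eb3></eb3>",
   "<eb4></eb4>", "<eb5></eb5>", "<eb6></eb6>",
   "<eb7></eb7>", "<eb8></eb8>", "<eb9></eb9>",
   "<eb10></eb10>"]

-- ===== PORT A =====
def get_bbox_nums (tokens : List String) : Int :=
  tokens.foldl (fun count t => if pvPattern.contains t then count + 1 else count) 0

-- ===== PORT B =====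
def get_bbox_nums_alt (tokens : List String) : Int :=
  let counts : PySem.Dict String Int :=
    tokens.foldl (fun d t => d.insert t (d.getD t 0 + 1)) PySem.Dict.empty
  pvPattern.foldl (fun s p => s + counts.getD p 0) 0

-- ===== PRECONDITION & SPEC =====
def Spec_get_bbox_nums (tokens : List String) (out : Int) : Prop := out = get_bbox_nums_alt tokens
instance (tokens : List String) (out : Int) : Decidable (Spec_get_bbox_nums tokens out) := by unfold Spec_get_bbox_nums; infer_instance

-- ===== CLAIM (what is proved, stated in full; the proofs are below) =====
def Claim_equal_get_bbox_nums : Prop := ∀ (tokens : List String), Dom_get_bbox_nums tokens → Spec_get_bbox_nums tokens (get_bbox_nums tokens)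

-- ===== LEMMAS AND PROOFS =====

-- Counting membership hits over the tokens equals summing, over a duplicate-free pattern
-- list, the number of occurrences of each pattern among the tokens.
theorem pvCountP_eq_sum (P : List String) (hP : P.Nodup) (tokens : List String) :
    ((tokens.countP (fun t => P.contains t) : Nat) : Int)
      = (P.map (fun p => (tokens.count p : Int))).sum := by
  induction tokens with
  | nil => simp
  | cons t ts ih =>
    calc ((List.countP (fun x => P.contains x) (t :: ts) : Nat) : Int)
        = ((ts.countP (fun x => P.contains x) : Nat) : Int)
            + (if P.contains t then (1:Int) else 0) := by
          rw [List.countP_cons]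
          by_cases h : P.contains t = true <;> simp only [h, if_true, if_false,
            Bool.false_eq_true, Nat.cast_add, Nat.cast_one, add_zero]
      _ = (P.map (fun p => (ts.count p : Int))).sum + ((P.count t : Nat) : Int) := by
          rw [ih]
          congr 1
          by_cases h : t ∈ P
          · rw [List.count_eq_one_of_mem hP h]; simp [h]
          · rw [List.count_eq_zero_of_not_mem h]; simp [h]
      _ = (P.map (fun p => (ts.count p : Int) + if (p == t) then (1:Int) else 0)).sum := by
          rw [PySem.List.sum_map_add_int, PySem.List.sum_map_ite_one_zero]
          congr 1
      _ = (P.map (fun p => ((t :: ts).count p : Int))).sum := by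
          apply congrArg
          apply List.map_congr_left
          intro p _
          rw [List.count_cons]
          by_cases h : p = t
          · subst h; simp
          · simp [h, Ne.symm h]

theorem pvPattern_nodup : pvPattern.Nodup := by decide

-- B's dict fold is a frequency counter, and its pattern fold sums the counts.
theorem pvB_eq_sum (tokens : List String) :
    get_bbox_nums_alt tokens = (pvPattern.map (fun p => (tokens.count p : Int))).sum := by
  unfold get_bbox_nums_alt
  rw [PySem.List.foldl_add]
  simp [PySem.Dict.getD_foldl_insert_add_one]

-- ===== VERDICT (by name: the statement is the Claim_ definition above) =====
theorem get_bbox_nums_spec : Claim_equal_get_bbox_nums := by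
  intro tokens _
  show get_bbox_nums tokens = get_bbox_nums_alt tokens
  rw [get_bbox_nums, PySem.List.foldl_if_add_one, pvB_eq_sum,
    ← pvCountP_eq_sum pvPattern pvPattern_nodup]
  rw [zero_add]
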